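-- pv_equiv track=rewrite | github.com/JesusDMan/Delta | delta/src/delta.py | split_payload
-- ===== SOURCE A (Python) =====
-- def split_payload(payload: str):
--     is_after_mark = False
--     split_index = 0
--     for i, ch in enumerate(payload):
--
--         if ch == "$" and not is_after_mark:
--             split_index = i
--
--         if ch == "\\":
--             if is_after_mark:
--                 is_after_mark = False
--             else:
--                 is_after_mark = True
--         if ch != "\\":
--             is_after_mark = False
--     return payload[:split_index], payload[split_index + 1:]
-- ===== SOURCE B (Python) =====
-- def split_payload(payload: str):
--     split_index = 0
--     for i in range(len(payload) - 1, -1, -1):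
--         if payload[i] == "$":
--             cnt = 0
--             j = i - 1
--             while j >= 0 and payload[j] == "\\":
--                 cnt += 1
--                 j -= 1
--             if cnt % 2 == 0:
--                 split_index = i
--                 break
--     return payload[:split_index], payload[split_index + 1:]
-- ===== Notes on version B (the rewrite author's own statement) =====
-- stated objective: alternative
-- what changed: B replaces A's full forward scan with an escape-parity state machine by a backward index scan that stops at the first dollar marker from the end preceded by an even run of backslashes (early exit).
import Mathlib
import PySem

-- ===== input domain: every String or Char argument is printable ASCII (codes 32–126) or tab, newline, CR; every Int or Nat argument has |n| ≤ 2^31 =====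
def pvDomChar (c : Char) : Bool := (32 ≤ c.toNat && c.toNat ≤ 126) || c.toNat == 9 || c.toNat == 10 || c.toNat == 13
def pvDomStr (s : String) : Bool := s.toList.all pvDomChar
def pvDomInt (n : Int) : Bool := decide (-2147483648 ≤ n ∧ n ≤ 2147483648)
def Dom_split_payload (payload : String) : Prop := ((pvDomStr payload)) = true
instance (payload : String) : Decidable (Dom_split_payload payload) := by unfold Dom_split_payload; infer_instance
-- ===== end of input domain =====

-- B scans the payload from the END and stops at the first (= last) unescaped dollar marker (even backslash-run
-- parity), instead of A's full forward pass with an escape-state machine; objective: alternative.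


-- ===== PORT A =====
-- state = (is_after_mark, split_index); one loop-body step of A, in A's branch order
def pvStepA (s : Bool × Int) (ic : Int × Char) : Bool × Int :=
  let si := if ic.2 = '$' ∧ s.1 = false then ic.1 else s.2
  let m1 := if ic.2 = '\\' then (if s.1 = true then false else true) else s.1
  let m2 := if ic.2 ≠ '\\' then false else m1
  (m2, si)

def pvFoldA (l : List Char) : Bool × Int :=
  (PySem.List.enumerate l 0).foldl pvStepA (false, 0)

def split_payload (payload : String) : String × String :=
  let st := pvFoldA payload.toList
  (PySem.Str.slice payload none (some st.2),
   PySem.Str.slice payload (some (st.2 + 1)) none)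

-- ===== PORT B =====
-- the inner while loop of B: number of consecutive backslashes at positions i-1, i-2, …
def pvCnt (l : List Char) : Nat → Nat
  | 0 => 0
  | j + 1 => if l[j]? = some '\\' then pvCnt l j + 1 else 0

-- the reversed index loop of B: scan positions i-1, i-2, …, 0 for an unescaped '$'; default 0
def pvFind (l : List Char) : Nat → Nat
  | 0 => 0
  | i + 1 => if l[i]? = some '$' ∧ pvCnt l i % 2 = 0 then i else pvFind l i

def split_payload_alt (payload : String) : String × String :=
  let si : Nat := pvFind payload.toList payload.toList.length
  (PySem.Str.slice payload none (some (si : Int)),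
   PySem.Str.slice payload (some ((si : Int) + 1)) none)

-- ===== PRECONDITION & SPEC =====
def Spec_split_payload (payload : String) (out : String × String) : Prop := out = split_payload_alt payload
instance (payload : String) (out : String × String) : Decidable (Spec_split_payload payload out) := by unfold Spec_split_payload; infer_instance

-- ===== CLAIM (what is proved, stated in full; the proofs are below) =====
def Claim_equal_split_payload : Prop := ∀ (payload : String), Dom_split_payload payload → Spec_split_payload payload (split_payload payload)

-- ===== LEMMAS AND PROOFS =====

theorem pvCnt_append (l : List Char) (c : Char) (j : Nat) (hj : j ≤ l.length) :
    pvCnt (l ++ [c]) j = pvCnt l j := by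
  induction j with
  | zero => rfl
  | succ j ih =>
    have hj' : j < l.length := by omega
    simp [pvCnt, List.getElem?_append_left hj', ih (by omega)]

theorem pvFind_append (l : List Char) (c : Char) (i : Nat) (hi : i ≤ l.length) :
    pvFind (l ++ [c]) i = pvFind l i := by
  induction i with
  | zero => rfl
  | succ i ih =>
    have hi' : i < l.length := by
      omega
    simp [pvFind, List.getElem?_append_left hi', pvCnt_append l c i (by omega), ih (by omega)]

theorem pvCnt_append_top (l : List Char) (c : Char) :
    pvCnt (l ++ [c]) (l.length + 1) =
      if c = '\\' then pvCnt l l.length + 1 else 0 := by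
  have h : (l ++ [c])[l.length]? = some c := by simp
  simp only [pvCnt, h, Option.some.injEq, pvCnt_append l c l.length le_rfl]

theorem pvFoldA_append (l : List Char) (c : Char) :
    pvFoldA (l ++ [c]) = pvStepA (pvFoldA l) ((l.length : Int), c) := by
  simp [pvFoldA, PySem.List.enumerate_append, PySem.List.enumerate]

-- the invariant tying A's state machine to B's backward characterisation
theorem pvFoldA_eq (l : List Char) :
    pvFoldA l = (decide (pvCnt l l.length % 2 = 1), ((pvFind l l.length : Nat) : Int)) := by
  induction l using List.reverseRecOn with
  | nil => rfl
  | append_singleton l c ih =>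
    rw [pvFoldA_append, ih]
    have hcnt := pvCnt_append_top l c
    have hfind := pvFind_append l c l.length le_rfl
    have hget : (l ++ [c])[l.length]? = some c := by simp
    simp only [List.length_append, List.length_cons, List.length_nil]
    simp only [pvFind, hget, hcnt, hfind, pvStepA, Option.some.injEq,
      pvCnt_append l c l.length le_rfl]
    by_cases hd : c = '$'
    · subst hd
      by_cases hm : pvCnt l l.length % 2 = 1
      · have h0 : ¬ (pvCnt l l.length % 2 = 0) := by omega
        simp [hm]
      · have h0 : pvCnt l l.length % 2 = 0 := by omega
        simp [h0]
    · by_cases hb : c = '\\'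
      · subst hb
        by_cases hm : pvCnt l l.length % 2 = 1
        · have h1 : ¬ ((pvCnt l l.length + 1) % 2 = 1) := by omega
          simp [hm, h1, hd]
        · have h1 : (pvCnt l l.length + 1) % 2 = 1 := by omega
          simp [hm, h1, hd]
      · simp [hd, hb]

-- ===== VERDICT (by name: the statement is the Claim_ definition above) =====
theorem split_payload_spec : Claim_equal_split_payload := by
  intro payload _
  show _ = _
  simp only [split_payload, split_payload_alt, pvFoldA_eq]
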